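-- pv_equiv track=rewrite | github.com/HarryRudolph/Steganography-LSB | main.py | payloadToBinaryList
-- ===== SOURCE A (Python) =====
-- def payloadToBinaryList(payload):
--     characterList = []
--     payloadBitList = []
--
--     for char in payload:
--         characterList.append(ord(char))
--     characterList.append(ord(" ")) #End of message.
--
--     #Add length of list to start.
--     payloadByteLength = len(characterList)
--
--     #3 bytes to store size of message. 16,777,215 bytes(ASCII characters) max
--     binaryLength = payloadByteLength | (1<<24) #Binary representation of length, need the 1 to keep in onder
--
--     j = 0
--     for i in bin(binaryLength):
--         if j > 2: #To Ignore 0b1...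
--             payloadBitList.append(int(i))
--         j += 1
--
--     for char in characterList:
--         for i in range(8):
--             filter = 1 << (7-i) #Creating a filter starting with leftmost digit.
--             result = char & filter #Getting leftmost digit with filter
--             bit = result >> (7-i) #Removing trailing 0s
--             payloadBitList.append(bit)
--     return payloadBitList
-- ===== SOURCE B (Python) =====
-- def payloadToBinaryList(payload):
--     # One uniform byte-to-bits pass: 3 header bits-source (length | 1<<24, top bit
--     # dropped arithmetically) then 8 MSB-first bits per byte.
--     L = len(payload) + 1
--     data = [ord(c) & 0xFF for c in payload] + [ord(" ") & 0xFF]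
--     n = L | (1 << 24)
--     rev = []
--     while n > 1:
--         rev.append(n & 1)
--         n >>= 1
--     bits = rev[::-1]
--     for b in data:
--         for k in range(7, -1, -1):
--             bits.append((b >> k) & 1)
--     return bits
-- ===== Notes on version B (the rewrite author's own statement) =====
-- stated objective: alternative
-- what changed: A parses the string produced by bin(len|1<<24) with a position counter for the header and uses a per-character mask/shift pair (char & (1<<(7-i))) >> (7-i) for the body; B never formats a string: it extracts the header bits arithmetically (collect n&1 while n>1, then reverse) and emits the body with a single uniform (byte>>k)&1 pass over the byte list built by one comprehension.
import Mathlib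
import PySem

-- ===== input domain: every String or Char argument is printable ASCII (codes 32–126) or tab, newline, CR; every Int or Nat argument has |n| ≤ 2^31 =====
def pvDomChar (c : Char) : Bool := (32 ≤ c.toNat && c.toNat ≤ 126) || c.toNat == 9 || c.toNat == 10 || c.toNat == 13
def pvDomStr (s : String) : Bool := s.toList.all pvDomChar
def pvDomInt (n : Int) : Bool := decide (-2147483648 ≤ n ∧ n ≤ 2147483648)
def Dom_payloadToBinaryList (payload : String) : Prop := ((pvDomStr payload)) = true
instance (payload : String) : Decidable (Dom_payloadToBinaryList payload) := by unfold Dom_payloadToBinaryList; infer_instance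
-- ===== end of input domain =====

-- B replaces A's bin()-string parsing and per-char filter/shift phases by one arithmetic
-- bit extraction for the header plus a uniform byte-to-bits pass (objective: alternative decomposition).


-- ===== PORT A =====
-- int(i) on a one-character string of bin()'s output; the default is unreachable (bin's digits always parse)
def pvIntChar (c : Char) : Int := (PySem.Int.ofChars? [c]).getD 0

def payloadToBinaryList (payload : String) : List Int :=
  let characterList : List Int :=
    (payload.toList.foldl (fun acc c => acc ++ [((c.toNat : Nat) : Int)]) []) ++ [((' '.toNat : Nat) : Int)]
  let payloadByteLength : Int := PySem.List.len characterList
  let binaryLength : Int := PySem.Int.bor payloadByteLength ((1:Int) <<< (24:Nat))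
  let afterHeader : List Int :=
    ((PySem.Int.pyBin binaryLength).toList.foldl
      (fun (s : Int × List Int) c => (s.1 + 1, if 2 < s.1 then s.2 ++ [pvIntChar c] else s.2))
      ((0 : Int), ([] : List Int))).2
  characterList.foldl
    (fun acc ch =>
      (PySem.List.pyRange 0 8 1).foldl
        (fun acc2 i =>
          acc2 ++ [(PySem.Int.band ch ((1:Int) <<< ((7 - i).toNat))) >>> ((7 - i).toNat)]) acc)
    afterHeader
    -- filter = 1 << (7-i); result = ch & filter; bit = result >> (7-i): inlined; i ∈ range(8) so (7-i).toNat is exact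

-- ===== PORT B =====
-- the while-loop of Source B: collect n & 1 and halve while n > 1 (stops below the sentinel top bit)
def pvLsbBits (n : Int) : List Int :=
  if 1 < n then PySem.Int.band n 1 :: pvLsbBits (n >>> (1:Nat)) else []
termination_by n.toNat
decreasing_by
  rename_i h
  cases n with
  | ofNat m =>
    have e : (Int.ofNat m) >>> (1:Nat) = Int.ofNat (m >>> 1) := rfl
    rw [e]
    simp only [Int.ofNat_eq_natCast, Int.toNat_natCast, Nat.shiftRight_eq_div_pow, pow_one]
    rw [Int.ofNat_eq_natCast] at h
    have : 1 < m := by exact_mod_cast h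
    omega
  | negSucc m => exact absurd (Int.negSucc_lt_zero m) (by omega)

def pvByteBits (b : Int) : List Int :=
  (PySem.List.pyRange 7 (-1) (-1)).map (fun k => PySem.Int.band (b >>> (k.toNat)) 1)

def payloadToBinaryList_alt (payload : String) : List Int :=
  let L : Int := PySem.Str.len payload + 1
  let data : List Int :=
    payload.toList.map (fun c => PySem.Int.band ((c.toNat : Nat) : Int) 255)
      ++ [PySem.Int.band ((' '.toNat : Nat) : Int) 255]
  let bits : List Int := (pvLsbBits (PySem.Int.bor L ((1:Int) <<< (24:Nat)))).reverse
  data.foldl (fun acc b => acc ++ pvByteBits b) bits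

-- ===== PRECONDITION & SPEC =====
def Spec_payloadToBinaryList (payload : String) (out : List Int) : Prop := out = payloadToBinaryList_alt payload
instance (payload : String) (out : List Int) : Decidable (Spec_payloadToBinaryList payload out) := by unfold Spec_payloadToBinaryList; infer_instance

-- ===== CLAIM (what is proved, stated in full; the proofs are below) =====
def Claim_equal_payloadToBinaryList : Prop := ∀ (payload : String), Dom_payloadToBinaryList payload → Spec_payloadToBinaryList payload (payloadToBinaryList payload)

-- ===== LEMMAS AND PROOFS =====

-- Nat-level mirror of pvLsbBits
def pvLsbNums (m : Nat) : List Nat :=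
  if 1 < m then m % 2 :: pvLsbNums (m / 2) else []

-- MSB-first binary digit characters of a Nat (what Nat.toDigits 2 computes)
def pvBitsChars (m : Nat) : List Char :=
  if _h : m < 2 then [Nat.digitChar m] else pvBitsChars (m / 2) ++ [Nat.digitChar (m % 2)]

theorem pvToDigitsCore_eq : ∀ (fuel m : Nat) (ds : List Char), m < fuel →
    Nat.toDigitsCore 2 fuel m ds = pvBitsChars m ++ ds := by
  intro fuel
  induction fuel with
  | zero => intro m ds h; omega
  | succ fuel ih =>
    intro m ds h
    rw [Nat.toDigitsCore]
    by_cases h2 : m / 2 = 0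
    · have hm : m < 2 := by omega
      rw [pvBitsChars]
      simp [h2, hm, Nat.mod_eq_of_lt hm]
    · have hm : ¬ m < 2 := by omega
      rw [if_neg h2, ih (m / 2) _ (by omega)]
      conv_rhs => rw [pvBitsChars]
      rw [dif_neg hm]
      simp

theorem pvToDigits_two (m : Nat) : Nat.toDigits 2 m = pvBitsChars m := by
  unfold Nat.toDigits
  rw [pvToDigitsCore_eq (m + 1) m [] (by omega)]
  simp

theorem pvBitsChars_eq : ∀ (m : Nat), 1 ≤ m →
    pvBitsChars m = '1' :: ((pvLsbNums m).map Nat.digitChar).reverse := by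
  intro m
  induction m using Nat.strong_induction_on with
  | _ m ih =>
    intro h
    rw [pvBitsChars, pvLsbNums]
    by_cases h2 : m < 2
    · have hm : m = 1 := by omega
      subst hm
      rw [dif_pos (by omega : (1:Nat) < 2), if_neg (by omega : ¬ (1:Nat) < 1)]
      rfl
    · rw [dif_neg h2, if_pos (by omega : 1 < m), ih (m / 2) (by omega) (by omega)]
      simp

theorem pvLsbNums_lt_two : ∀ (m : Nat), ∀ x ∈ pvLsbNums m, x < 2 := by
  intro m
  induction m using Nat.strong_induction_on with
  | _ m ih =>
    intro x hx
    rw [pvLsbNums] at hx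
    by_cases h : 1 < m
    · rw [if_pos h] at hx
      rcases List.mem_cons.mp hx with rfl | hx
      · omega
      · exact ih (m / 2) (by omega) x hx
    · rw [if_neg h] at hx
      simp at hx

theorem pvLsbBits_natCast : ∀ (m : Nat), pvLsbBits (m : Int) = (pvLsbNums m).map (fun x : Nat => (x : Int)) := by
  intro m
  induction m using Nat.strong_induction_on with
  | _ m ih =>
    rw [pvLsbBits, pvLsbNums]
    by_cases h : 1 < m
    · rw [if_pos (by exact_mod_cast h : (1:Int) < (m:Int)), if_pos h]
      have hb : PySem.Int.band (m : Int) 1 = ((m % 2 : Nat) : Int) := by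
        have hc := PySem.Int.band_natCast m 1
        rw [Nat.and_one_is_mod] at hc
        exact_mod_cast hc
      have hs : ((m : Int) >>> (1:Nat)) = ((m / 2 : Nat) : Int) := by
        rw [show ((m : Int) >>> (1:Nat)) = ((m >>> 1 : Nat) : Int) from rfl]
        norm_num [Nat.shiftRight_eq_div_pow]
      rw [hb, hs, ih (m / 2) (by omega)]
      simp
    · rw [if_neg (by exact_mod_cast h : ¬ (1:Int) < (m:Int)), if_neg h]
      rfl

theorem pvIntChar_digit (x : Nat) (h : x < 2) : pvIntChar (Nat.digitChar x) = (x : Int) := by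
  interval_cases x <;> decide

theorem pvFoldJ : ∀ (cs : List Char) (j : Int) (acc : List Int), 3 ≤ j →
    (cs.foldl (fun (s : Int × List Int) c => (s.1 + 1, if 2 < s.1 then s.2 ++ [pvIntChar c] else s.2))
      (j, acc)).2 = acc ++ cs.map pvIntChar := by
  intro cs
  induction cs with
  | nil => intro j acc h; simp
  | cons c cs ih =>
    intro j acc h
    simp only [List.foldl, List.map]
    rw [if_pos (by omega : 2 < j), ih (j + 1) _ (by omega)]
    simp

theorem pvHeaderFold (rest : List Char) :
    (('0' :: 'b' :: '1' :: rest).foldl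
      (fun (s : Int × List Int) c => (s.1 + 1, if 2 < s.1 then s.2 ++ [pvIntChar c] else s.2))
      ((0 : Int), ([] : List Int))).2 = rest.map pvIntChar := by
  have h1 : (('0' :: 'b' :: '1' :: rest).foldl
      (fun (s : Int × List Int) c => (s.1 + 1, if 2 < s.1 then s.2 ++ [pvIntChar c] else s.2))
      ((0 : Int), ([] : List Int)))
      = rest.foldl
        (fun (s : Int × List Int) c => (s.1 + 1, if 2 < s.1 then s.2 ++ [pvIntChar c] else s.2))
        ((3 : Int), ([] : List Int)) := by
    simp only [List.foldl_cons]
    norm_num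
  rw [h1, pvFoldJ rest 3 [] (by norm_num), List.nil_append]

theorem pvBitFact (c k : Nat) : (c &&& 2 ^ k) >>> k = (c >>> k) &&& 1 := by
  rw [Nat.and_two_pow, Nat.and_one_is_mod, Nat.shiftRight_eq_div_pow, Nat.shiftRight_eq_div_pow,
      Nat.mul_div_cancel _ (Nat.two_pow_pos k), Nat.testBit_eq_decide_div_mod_eq]
  rcases Nat.mod_two_eq_zero_or_one (c / 2 ^ k) with h | h <;> simp [h]

theorem pvBitInt (c k : Nat) :
    (PySem.Int.band (c : Int) ((1:Int) <<< k)) >>> k = PySem.Int.band ((c : Int) >>> k) 1 := by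
  have key : ((c &&& 1 <<< k) >>> k : Nat) = (c >>> k) &&& 1 := by
    rw [Nat.one_shiftLeft]; exact pvBitFact c k
  have l1 : PySem.Int.band (c : Int) ((1:Int) <<< k) = (((c &&& 1 <<< k) : Nat) : Int) := by
    rw [show ((1:Int) <<< k) = ((1 <<< k : Nat) : Int) from rfl]
    exact PySem.Int.band_natCast c (1 <<< k)
  have l2 : PySem.Int.band ((c : Int) >>> k) 1 = ((((c >>> k) &&& 1) : Nat) : Int) := by
    rw [show ((c : Int) >>> k) = ((c >>> k : Nat) : Int) from rfl]
    exact_mod_cast PySem.Int.band_natCast (c >>> k) 1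
  rw [l1, l2,
      show ((((c &&& 1 <<< k) : Nat) : Int) >>> k) = ((((c &&& 1 <<< k) >>> k) : Nat) : Int) from rfl,
      key]

theorem pvBitIntZ (c k : Nat) :
    (PySem.Int.band (c : Int) ((1:Int) <<< ((k : Nat) : Int))) >>> ((k : Nat) : Int)
      = PySem.Int.band ((c : Int) >>> ((k : Nat) : Int)) 1 := by
  have e1 : ((1:Int) <<< ((k : Nat) : Int)) = ((1:Int) <<< (k : Nat)) :=
    Int.shiftLeft_natCast_right 1 k
  have e2 : ∀ a : Int, (a >>> ((k : Nat) : Int)) = (a >>> (k : Nat)) := fun a =>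
    Int.shiftRight_natCast_right a k
  rw [e1, e2, e2]
  exact pvBitInt c k

theorem pvBand255 (c : Nat) (h : c < 256) : PySem.Int.band (c : Int) 255 = (c : Int) := by
  have h2 : c &&& 255 = c := by
    rw [show (255 : Nat) = 2 ^ 8 - 1 from by norm_num, Nat.and_two_pow_sub_one_eq_mod,
        Nat.mod_eq_of_lt (by omega)]
  calc PySem.Int.band (c : Int) 255 = ((c &&& 255 : Nat) : Int) := by
        exact_mod_cast PySem.Int.band_natCast c 255
    _ = (c : Int) := by rw [h2]

theorem pvInnerA (c : Nat) (hc : c < 256) :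
    (PySem.List.pyRange 0 8 1).map
        (fun i => (PySem.Int.band (c : Int) ((1:Int) <<< ((7 - i).toNat))) >>> ((7 - i).toNat))
      = pvByteBits (PySem.Int.band (c : Int) 255) := by
  rw [pvBand255 c hc]
  simp only [pvByteBits]
  rw [show PySem.List.pyRange 0 8 1 = [0,1,2,3,4,5,6,7] from by decide,
      show PySem.List.pyRange 7 (-1) (-1) = [7,6,5,4,3,2,1,0] from by decide]
  simp only [List.map]
  norm_num
  repeat' apply And.intro
  all_goals first
    | simpa using pvBitIntZ c 0
    | simpa using pvBitIntZ c 1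
    | simpa using pvBitIntZ c 2
    | simpa using pvBitIntZ c 3
    | simpa using pvBitIntZ c 4
    | simpa using pvBitIntZ c 5
    | simpa using pvBitIntZ c 6
    | simpa using pvBitIntZ c 7

-- ===== VERDICT (by name: the statement is the Claim_ definition above) =====
theorem payloadToBinaryList_spec : Claim_equal_payloadToBinaryList := by
  intro payload hdom
  unfold Spec_payloadToBinaryList
  have hchars : ∀ c ∈ payload.toList, c.toNat < 256 := by
    intro c hc
    unfold Dom_payloadToBinaryList pvDomStr at hdom
    have := List.all_eq_true.mp hdom c hc
    unfold pvDomChar at this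
    simp at this
    omega
  simp only [payloadToBinaryList, payloadToBinaryList_alt,
    PySem.List.foldl_append_singleton_eq_map, List.nil_append]
  set cs := payload.toList with hcs
  -- lengths and the OR'd sentinel
  have hL : PySem.Str.len payload + 1 = ((cs.length + 1 : Nat) : Int) := by
    rw [PySem.Str.len_eq]; push_cast; ring
  have hlenA : PySem.List.len (cs.map (fun c => ((c.toNat : Nat) : Int)) ++ [((' '.toNat : Nat) : Int)])
      = ((cs.length + 1 : Nat) : Int) := by
    rw [PySem.List.len_eq]; simp
  set m : Nat := cs.length + 1 with hm
  set N : Nat := m ||| 16777216 with hN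
  have hbor : PySem.Int.bor ((m : Nat) : Int) ((1:Int) <<< (24:Nat)) = ((N : Nat) : Int) := by
    rw [show ((1:Int) <<< (24:Nat)) = ((16777216 : Nat) : Int) from by decide, PySem.Int.bor_natCast]
  have hN1 : 1 ≤ N := by
    have := @Nat.left_le_or m 16777216
    omega
  rw [hlenA, hL, hbor]
  -- the header: A's bin()-parsing loop equals B's reversed lsb loop
  have hbin : (PySem.Int.pyBin ((N : Nat) : Int)).toList
      = '0' :: 'b' :: '1' :: ((pvLsbNums N).map Nat.digitChar).reverse := by
    rw [PySem.Int.toList_pyBin]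
    simp [PySem.Int.toBinChars0b, pvToDigits_two, pvBitsChars_eq N hN1]
  rw [hbin]
  have hhead : (('0' :: 'b' :: '1' :: ((pvLsbNums N).map Nat.digitChar).reverse).foldl
      (fun (s : Int × List Int) c => (s.1 + 1, if 2 < s.1 then s.2 ++ [pvIntChar c] else s.2))
      ((0 : Int), ([] : List Int))).2 = (pvLsbBits ((N : Nat) : Int)).reverse := by
    rw [pvHeaderFold, List.map_reverse, List.map_map, pvLsbBits_natCast]
    exact congrArg List.reverse
      (List.map_congr_left fun x hx => pvIntChar_digit x (pvLsbNums_lt_two N x hx))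
  rw [hhead]
  rw [PySem.List.foldl_congr_mem (cs.map (fun c => ((c.toNat : Nat) : Int)) ++ [((' '.toNat : Nat) : Int)])
      _ (fun acc ch => acc ++ pvByteBits (PySem.Int.band ch 255)) _ (by
        intro acc ch hch
        rcases List.mem_append.mp hch with hch | hch
        · obtain ⟨c, hcmem, rfl⟩ := List.mem_map.mp hch
          exact congrArg (acc ++ ·) (pvInnerA c.toNat (hchars c hcmem))
        · rw [List.mem_singleton.mp hch]
          exact congrArg (acc ++ ·) (pvInnerA ' '.toNat (by decide)))]
  rw [PySem.List.foldl_append_eq_flatMap, PySem.List.foldl_append_eq_flatMap]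
  simp [List.flatMap_append, List.flatMap_map]
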